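-- pv_equiv track=rewrite | github.com/ngoduythinh250601/Codelearn | minRemovals/minRemovals.py | minRemovals
-- ===== SOURCE A (Python) =====
-- def minRemovals(arr, k):
--     arr.sort()
--     n, ans = len(arr), 0
--     i, j = 0, 0
--     while i < n:
--         while j < n and arr[j] <= arr[i] + k:
--             j += 1
--         ans = max(ans, j - i)
--         i += 1
--     if ans == n:
--         ans = n - 1
--     return n - ans
-- ===== SOURCE B (Python) =====
-- def minRemovals(arr, k):
--     arr.sort()
--     n = len(arr)
--     best = 0
--     for i in range(n):
--         b = arr[i] + k
--         lo, hi = 0, n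
--         while lo < hi:
--             mid = (lo + hi) // 2
--             if arr[mid] <= b:
--                 lo = mid + 1
--             else:
--                 hi = mid
--         best = max(best, lo - i)
--     if best == n:
--         best = n - 1
--     return n - best
-- ===== Notes on version B (the rewrite author's own statement) =====
-- stated objective: alternative
-- what changed: Replaces the amortized two-pointer sweep (a shared j pointer advanced across outer iterations) with an independent binary search per start index for the first element exceeding arr[i]+k, keeping the same final adjustment and return.
import Mathlib
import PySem

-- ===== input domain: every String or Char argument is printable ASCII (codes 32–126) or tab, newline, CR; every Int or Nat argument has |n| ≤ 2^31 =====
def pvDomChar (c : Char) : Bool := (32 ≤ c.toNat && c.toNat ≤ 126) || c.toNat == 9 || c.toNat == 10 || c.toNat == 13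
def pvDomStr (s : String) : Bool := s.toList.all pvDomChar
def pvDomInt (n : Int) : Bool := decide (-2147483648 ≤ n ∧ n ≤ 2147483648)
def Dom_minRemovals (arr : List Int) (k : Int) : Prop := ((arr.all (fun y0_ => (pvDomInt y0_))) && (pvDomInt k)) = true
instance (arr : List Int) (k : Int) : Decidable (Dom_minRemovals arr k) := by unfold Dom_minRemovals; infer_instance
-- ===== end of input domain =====

-- B replaces A's amortized two-pointer sweep by an independent binary search per start
-- index (alternative decomposition). Both versions sort the caller's list in place in
-- Python; the equivalence proved here is about the return value.

-- ===== PORT A =====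
-- inner 'while j < n and arr[j] <= arr[i] + k: j += 1'
def pyAInner (s : List Int) (n : Nat) (b : Int) (j : Nat) : Nat :=
  if h : j < n ∧ s.getD j 0 ≤ b then pyAInner s n b (j + 1) else j
termination_by n - j
decreasing_by omega

-- outer 'while i < n' loop carrying ans and the shared pointer j
def pyAOuter (s : List Int) (k : Int) (n : Nat) (i j : Nat) (ans : Int) : Int :=
  if _h : i < n then
    let j' := pyAInner s n (s.getD i 0 + k) j
    pyAOuter s k n (i + 1) j' (max ans ((j' : Int) - (i : Int)))
  else ans
termination_by n - i

def minRemovals (arr : List Int) (k : Int) : Int :=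
  let s := PySem.List.sorted arr (fun x => x) false
  let n := s.length
  let ans := pyAOuter s k n 0 0 0
  let ans := if ans = (n : Int) then (n : Int) - 1 else ans
  (n : Int) - ans

-- ===== PORT B =====
-- the 'while lo < hi' binary search for the first index whose element exceeds b;
-- fuel = hi - lo bounds the iteration count (the gap shrinks by at least 1 per step),
-- so the fuel-out branch is never taken with lo < hi
def bsearchGtAux (s : List Int) (b : Int) (lo hi : Nat) : Nat → Nat
  | 0 => lo
  | fuel + 1 =>
    if lo < hi then
      let mid := (lo + hi) / 2
      if s.getD mid 0 ≤ b then bsearchGtAux s b (mid + 1) hi fuel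
      else bsearchGtAux s b lo mid fuel
    else lo

def bsearchGt (s : List Int) (b : Int) (lo hi : Nat) : Nat :=
  bsearchGtAux s b lo hi (hi - lo)

def minRemovals_alt (arr : List Int) (k : Int) : Int :=
  let s := PySem.List.sorted arr (fun x => x) false
  let n := s.length
  let best := (List.range n).foldl
    (fun best i => max best ((bsearchGt s (s.getD i 0 + k) 0 n : Int) - (i : Int))) 0
  let best := if best = (n : Int) then (n : Int) - 1 else best
  (n : Int) - best

-- ===== PRECONDITION & SPEC =====
def Spec_minRemovals (arr : List Int) (k : Int) (out : Int) : Prop := out = minRemovals_alt arr k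
instance (arr : List Int) (k : Int) (out : Int) : Decidable (Spec_minRemovals arr k out) := by unfold Spec_minRemovals; infer_instance

-- ===== CLAIM (what is proved, stated in full; the proofs are below) =====
def Claim_equal_minRemovals : Prop := ∀ (arr : List Int) (k : Int), Dom_minRemovals arr k → Spec_minRemovals arr k (minRemovals arr k)

-- ===== LEMMAS AND PROOFS =====

-- the number of elements ≤ b (proof-side characterisation both ports are reduced to)
def countLe (s : List Int) (b : Int) : Nat := (s.filter (fun x => decide (x ≤ b))).length

-- monotone access on a (≤)-pairwise list
lemma getD_mono (s : List Int) (hs : s.Pairwise (· ≤ ·)) {t u : Nat}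
    (htu : t ≤ u) (hu : u < s.length) : s.getD t 0 ≤ s.getD u 0 := by
  rcases Nat.lt_or_ge t u with h | h
  · have := (List.pairwise_iff_getElem.mp hs) t u (lt_trans h hu) hu h
    simpa [List.getD_eq_getElem?_getD, List.getElem?_eq_getElem, lt_trans h hu, hu] using this
  · have : t = u := le_antisymm htu h
    simp [this]

-- countLe is the unique j with: everything before j is ≤ b and (j = n or s[j] > b)
lemma countLe_eq (s : List Int) (b : Int) (hs : s.Pairwise (· ≤ ·)) :
    ∀ j, j ≤ s.length → (∀ t, t < j → s.getD t 0 ≤ b) →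
      (j = s.length ∨ ¬ s.getD j 0 ≤ b) → countLe s b = j := by
  induction s with
  | nil => intro j hj _ _; simp [countLe] at hj ⊢; omega
  | cons x tl ih =>
    intro j hj hlt hge
    rcases List.pairwise_cons.mp hs with ⟨hx, htl⟩
    cases j with
    | zero =>
      have hxb : ¬ x ≤ b := by
        rcases hge with h | h
        · simp at h
        · simpa using h
      have : tl.filter (fun x => decide (x ≤ b)) = [] := by
        rw [List.filter_eq_nil_iff]
        intro y hy
        have := hx y hy
        simp only [decide_eq_true_eq]
        omega
      simp [countLe, hxb, this]
    | succ j' =>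
      have hxb : x ≤ b := by simpa using hlt 0 (Nat.succ_pos _)
      have h1 : countLe tl b = j' := by
        refine ih htl j' (by simpa using hj) ?_ ?_
        · intro t ht
          have := hlt (t + 1) (by omega)
          simpa using this
        · rcases hge with h | h
          · left; simpa using h
          · right; simpa using h
      simp [countLe, hxb] at h1 ⊢
      omega

-- everything strictly before index countLe s b is ≤ b
lemma getD_lt_countLe (s : List Int) (b : Int) (hs : s.Pairwise (· ≤ ·)) :
    ∀ t, t < countLe s b → s.getD t 0 ≤ b := by
  induction s with
  | nil => intro t ht; simp [countLe] at ht
  | cons x tl ih =>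
    intro t ht
    rcases List.pairwise_cons.mp hs with ⟨hx, htl⟩
    by_cases hxb : x ≤ b
    · cases t with
      | zero => simpa using hxb
      | succ t' =>
        have : t' < countLe tl b := by
          simp only [countLe] at ht ⊢
          simp [hxb] at ht
          omega
        simpa using ih htl t' this
    · have : tl.filter (fun x => decide (x ≤ b)) = [] := by
        rw [List.filter_eq_nil_iff]
        intro y hy
        have := hx y hy
        simp only [decide_eq_true_eq]
        omega
      simp [countLe, hxb, this] at ht
lemma countLe_le_length (s : List Int) (b : Int) : countLe s b ≤ s.length :=
  List.length_filter_le _ _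

-- A's inner while loop computes countLe, given the invariant on the incoming j
lemma pyAInner_eq (s : List Int) (b : Int) (hs : s.Pairwise (· ≤ ·)) :
    ∀ m j, m = s.length - j → j ≤ s.length → (∀ t, t < j → s.getD t 0 ≤ b) →
      pyAInner s s.length b j = countLe s b := by
  intro m
  induction m with
  | zero =>
    intro j hm hj hlt
    have hjn : j = s.length := by omega
    rw [pyAInner, dif_neg (by omega)]
    exact (countLe_eq s b hs j hj hlt (Or.inl hjn)).symm
  | succ m' ih =>
    intro j hm hj hlt
    rw [pyAInner]
    by_cases h : j < s.length ∧ s.getD j 0 ≤ b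
    · rw [dif_pos h]
      refine ih (j + 1) (by omega) (by omega) ?_
      intro t ht
      rcases Nat.lt_or_ge t j with h' | h'
      · exact hlt t h'
      · have : t = j := by omega
        simpa [this] using h.2
    · rw [dif_neg h]
      rcases Nat.lt_or_ge j s.length with hjn | hjn
      · have hb : ¬ s.getD j 0 ≤ b := by tauto
        exact (countLe_eq s b hs j hj hlt (Or.inr hb)).symm
      · have : j = s.length := by omega
        exact (countLe_eq s b hs j hj hlt (Or.inl this)).symm

-- A's outer loop is B's fold over the remaining start indices
lemma pyAOuter_eq (s : List Int) (k : Int) (hs : s.Pairwise (· ≤ ·)) :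
    ∀ m i j ans, m = s.length - i → j ≤ s.length →
      (i < s.length → ∀ t, t < j → s.getD t 0 ≤ s.getD i 0 + k) →
      pyAOuter s k s.length i j ans =
        (List.range' i m).foldl
          (fun a t => max a ((countLe s (s.getD t 0 + k) : Int) - (t : Int))) ans := by
  intro m
  induction m with
  | zero =>
    intro i j ans hm _ _
    rw [pyAOuter, dif_neg (by omega)]
    simp
  | succ m' ih =>
    intro i j ans hm hj hinv
    have hi : i < s.length := by omega
    rw [pyAOuter, dif_pos hi]
    have hj' : pyAInner s s.length (s.getD i 0 + k) j = countLe s (s.getD i 0 + k) :=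
      pyAInner_eq s _ hs (s.length - j) j rfl hj (hinv hi)
    rw [List.range'_succ, List.foldl_cons]
    simp only [hj']
    refine ih (i + 1) _ _ (by omega) (countLe_le_length _ _) ?_
    intro hi1 t ht
    have h1 : s.getD t 0 ≤ s.getD i 0 + k := getD_lt_countLe s _ hs t ht
    have h2 : s.getD i 0 ≤ s.getD (i + 1) 0 := getD_mono s hs (by omega) hi1
    omega

-- B's binary search computes countLe on a sorted list, given the bracketing invariants
lemma bsearchGtAux_eq (s : List Int) (b : Int) (hs : s.Pairwise (· ≤ ·)) :
    ∀ m lo hi, hi - lo ≤ m → lo ≤ hi → hi ≤ s.length →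
      (∀ t, t < lo → s.getD t 0 ≤ b) → (∀ t, hi ≤ t → t < s.length → ¬ s.getD t 0 ≤ b) →
      bsearchGtAux s b lo hi m = countLe s b := by
  intro m
  induction m with
  | zero =>
    intro lo hi hm hlh hhi hlt hgt
    simp only [bsearchGtAux]
    refine (countLe_eq s b hs lo (by omega) hlt ?_).symm
    rcases Nat.lt_or_ge lo s.length with h | h
    · exact Or.inr (hgt lo (by omega) h)
    · exact Or.inl (by omega)
  | succ m' ih =>
    intro lo hi hm hlh hhi hlt hgt
    simp only [bsearchGtAux]
    by_cases h : lo < hi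
    · rw [if_pos h]
      by_cases hmid : s.getD ((lo + hi) / 2) 0 ≤ b
      · rw [if_pos hmid]
        refine ih ((lo + hi) / 2 + 1) hi (by omega) (by omega) hhi ?_ hgt
        intro t ht
        exact le_trans (getD_mono s hs (by omega) (by omega)) hmid
      · rw [if_neg hmid]
        refine ih lo ((lo + hi) / 2) (by omega) (by omega) (by omega) hlt ?_
        intro t hmt htn
        have := getD_mono s hs hmt htn
        omega
    · rw [if_neg h]
      refine (countLe_eq s b hs lo (by omega) hlt ?_).symm
      rcases Nat.lt_or_ge lo s.length with h' | h'
      · exact Or.inr (hgt lo (by omega) h')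
      · exact Or.inl (by omega)

lemma bsearchGt_eq (s : List Int) (b : Int) (hs : s.Pairwise (· ≤ ·)) (lo hi : Nat)
    (hlh : lo ≤ hi) (hhi : hi ≤ s.length)
    (hlt : ∀ t, t < lo → s.getD t 0 ≤ b) (hgt : ∀ t, hi ≤ t → t < s.length → ¬ s.getD t 0 ≤ b) :
    bsearchGt s b lo hi = countLe s b :=
  bsearchGtAux_eq s b hs (hi - lo) lo hi (le_refl _) hlh hhi hlt hgt

-- the two loop results agree on any sorted list
lemma loops_eq (s : List Int) (k : Int) (hs : s.Pairwise (· ≤ ·)) :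
    pyAOuter s k s.length 0 0 0 =
      (List.range s.length).foldl
        (fun best i => max best ((bsearchGt s (s.getD i 0 + k) 0 s.length : Int) - (i : Int))) 0 := by
  rw [pyAOuter_eq s k hs s.length 0 0 0 (by omega) (Nat.zero_le _) (by intro _ t ht; omega)]
  rw [List.range_eq_range']
  congr 1
  funext a t
  rw [bsearchGt_eq s _ hs 0 s.length (Nat.zero_le _) (le_refl _)
    (by omega) (by intro u hu hun; omega)]

-- ===== VERDICT (by name: the statement is the Claim_ definition above) =====
theorem minRemovals_spec : Claim_equal_minRemovals := by
  intro arr k _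
  unfold Spec_minRemovals minRemovals minRemovals_alt
  have hs := PySem.List.sorted_pairwise arr (fun x => x)
  simp only at hs
  simp only [loops_eq (PySem.List.sorted arr (fun x => x) false) k hs]
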